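-- pv_equiv track=rewrite | github.com/mancilladev/Competitive-Programming | rosalind/bio_algos/ba1d.py | group_close_ones
-- ===== SOURCE A (Python) =====
-- def group_close_ones(positions):
--     groups = []
--     for i, p in enumerate(positions):
--         for g in groups:
--             if abs(g[0] - p) <= 500:
--                 g.append(p)
--                 break
--         else:
--             groups.append([p])
--     return groups
-- ===== SOURCE B (Python) =====
-- def group_close_ones(positions):
--     groups = []
--     buckets = {}  # floor(anchor/500) -> (group index, anchor); anchors are >500 apart, so one per bucket
--     for p in positions:
--         q = p // 500
--         best = None
--         for b in (q - 1, q, q + 1):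
--             e = buckets.get(b)
--             if e is not None and abs(e[1] - p) <= 500:
--                 if best is None or e[0] < best:
--                     best = e[0]
--         if best is None:
--             buckets[q] = (len(groups), p)
--             groups.append([p])
--         else:
--             groups[best].append(p)
--     return groups
-- ===== Notes on version B (the rewrite author's own statement) =====
-- stated objective: alternative
-- what changed: Replaces A's inner scan over all existing groups with a dict bucketing each group's anchor by floor(p/500): since anchors are pairwise more than 500 apart, only the 3 adjacent buckets are probed and the earliest-created matching group is chosen (O(n) in the number of groups per step instead of a linear scan, though not measurably faster on the timed inputs).
import Mathlib
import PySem

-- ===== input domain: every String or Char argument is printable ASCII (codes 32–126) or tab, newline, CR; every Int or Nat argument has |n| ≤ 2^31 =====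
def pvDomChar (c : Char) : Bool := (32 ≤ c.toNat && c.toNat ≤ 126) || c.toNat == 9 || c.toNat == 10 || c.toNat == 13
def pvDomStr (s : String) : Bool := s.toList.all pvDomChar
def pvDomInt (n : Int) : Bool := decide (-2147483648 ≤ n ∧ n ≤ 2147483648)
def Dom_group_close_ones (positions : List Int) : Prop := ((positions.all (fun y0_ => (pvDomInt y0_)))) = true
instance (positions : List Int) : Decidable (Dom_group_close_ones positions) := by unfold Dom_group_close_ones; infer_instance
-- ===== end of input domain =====

-- B replaces A's inner scan over all groups by a dict keyed on floor(anchor/500), probing only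
-- the 3 adjacent buckets (anchors are >500 apart, so one per bucket): a structurally different
-- exact re-implementation; equivalence is about the return value.

-- ===== PORT A =====
-- inner 'for g in groups: … break / else: append' loop of A
def pvStepA : List (List Int) → Int → List (List Int)
  | [], p => [[p]]
  | g :: rest, p =>
    if (g.headD 0 - p).natAbs ≤ 500 then (g ++ [p]) :: rest
    else g :: pvStepA rest p

def group_close_ones (positions : List Int) : List (List Int) :=
  positions.foldl pvStepA []

-- ===== PORT B =====
-- body of B's 'for b in (q-1, q, q+1)' loop: e = buckets.get(b); keep the smallest matching index
def pvCandStep (d : PySem.Dict Int (Int × Int)) (p : Int) (best : Option Int) (b : Int) : Option Int :=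
  match d.get? b with
  | none => best
  | some e =>
    if (e.2 - p).natAbs ≤ 500 then
      match best with
      | none => some e.1
      | some x => if e.1 < x then some e.1 else best
    else best

def pvBestOf (d : PySem.Dict Int (Int × Int)) (p : Int) : Option Int :=
  let q := PySem.Int.floordiv p 500
  [q - 1, q, q + 1].foldl (pvCandStep d p) none

-- groups[i].append(p); the index stored in the dict is len(groups) at creation time, hence
-- always a nonnegative in-range index, so .toNat is exact here
def pvAppendAt : List (List Int) → Nat → Int → List (List Int)
  | [], _, _ => []
  | g :: rest, 0, p => (g ++ [p]) :: rest
  | g :: rest, Nat.succ n, p => g :: pvAppendAt rest n p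

def pvStepB (st : List (List Int) × PySem.Dict Int (Int × Int)) (p : Int) :
    List (List Int) × PySem.Dict Int (Int × Int) :=
  match pvBestOf st.2 p with
  | none => (st.1 ++ [[p]], st.2.insert (PySem.Int.floordiv p 500) ((st.1.length : Int), p))
  | some i => (pvAppendAt st.1 i.toNat p, st.2)

def group_close_ones_alt (positions : List Int) : List (List Int) :=
  (positions.foldl pvStepB ([], PySem.Dict.empty)).1

-- ===== PRECONDITION & SPEC =====
def Spec_group_close_ones (positions : List Int) (out : List (List Int)) : Prop := out = group_close_ones_alt positions
instance (positions : List Int) (out : List (List Int)) : Decidable (Spec_group_close_ones positions out) := by unfold Spec_group_close_ones; infer_instance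

-- ===== CLAIM (what is proved, stated in full; the proofs are below) =====
def Claim_equal_group_close_ones : Prop := ∀ (positions : List Int), Dom_group_close_ones positions → Spec_group_close_ones positions (group_close_ones positions)

-- ===== LEMMAS AND PROOFS =====

-- anchor (first element) of group i
def pvAnc (groups : List (List Int)) (i : Nat) : Int := (groups.getD i []).headD 0

-- loop invariant: groups are nonempty, anchors pairwise >500 apart, and the dict maps exactly
-- each anchor's 500-bucket to (group index, anchor)
def pvInv (groups : List (List Int)) (d : PySem.Dict Int (Int × Int)) : Prop :=
  (∀ i : Nat, i < groups.length → groups.getD i [] ≠ []) ∧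
  (∀ i j : Nat, i < j → j < groups.length → 500 < (pvAnc groups i - pvAnc groups j).natAbs) ∧
  (∀ i : Nat, i < groups.length → d.get? (pvAnc groups i / 500) = some ((i : Int), pvAnc groups i)) ∧
  (∀ b e, d.get? b = some e → ∃ i : Nat, i < groups.length ∧ e = ((i : Int), pvAnc groups i) ∧ b = pvAnc groups i / 500)

-- the candidate a single bucket probe contributes
def pvC (d : PySem.Dict Int (Int × Int)) (p b : Int) : Option Int :=
  match d.get? b with
  | none => none
  | some e => if (e.2 - p).natAbs ≤ 500 then some e.1 else none

lemma pvCandStep_of_none {d : PySem.Dict Int (Int × Int)} {p b : Int} (acc : Option Int)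
    (h : pvC d p b = none) : pvCandStep d p acc b = acc := by
  unfold pvC at h
  unfold pvCandStep
  cases hg : d.get? b with
  | none => rfl
  | some e =>
    simp only [hg] at h ⊢
    by_cases hc : (e.2 - p).natAbs ≤ 500
    · simp [hc] at h
    · simp [hc]

lemma pvCandStep_of_some_none {d : PySem.Dict Int (Int × Int)} {p b v : Int}
    (h : pvC d p b = some v) : pvCandStep d p none b = some v := by
  unfold pvC at h
  unfold pvCandStep
  cases hg : d.get? b with
  | none => simp [hg] at h
  | some e =>
    simp only [hg] at h ⊢
    by_cases hc : (e.2 - p).natAbs ≤ 500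
    · rw [if_pos hc] at h
      rw [if_pos hc]
      exact h
    · simp [hc] at h

lemma pvCandStep_of_some_some {d : PySem.Dict Int (Int × Int)} {p b v : Int} (x : Int)
    (h : pvC d p b = some v) : pvCandStep d p (some x) b = some (min v x) := by
  unfold pvC at h
  unfold pvCandStep
  cases hg : d.get? b with
  | none => simp [hg] at h
  | some e =>
    simp only [hg] at h ⊢
    by_cases hc : (e.2 - p).natAbs ≤ 500
    · rw [if_pos hc] at h
      rw [if_pos hc]
      obtain rfl : e.1 = v := Option.some.inj h
      by_cases hvx : e.1 < x
      · rw [if_pos hvx, min_eq_left (le_of_lt hvx)]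
      · rw [if_neg hvx, min_eq_right (by omega : x ≤ e.1)]
    · simp [hc] at h

-- full characterisation of the 'best' fold of B
lemma pvFoldlCand (d : PySem.Dict Int (Int × Int)) (p : Int) :
    ∀ (bs : List Int) (acc : Option Int),
    (∀ v : Int, bs.foldl (pvCandStep d p) acc = some v → acc = some v ∨ ∃ b ∈ bs, pvC d p b = some v) ∧
    (∀ v : Int, acc = some v → ∃ w : Int, bs.foldl (pvCandStep d p) acc = some w ∧ w ≤ v) ∧
    (∀ b ∈ bs, ∀ v : Int, pvC d p b = some v → ∃ w : Int, bs.foldl (pvCandStep d p) acc = some w ∧ w ≤ v) ∧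
    (bs.foldl (pvCandStep d p) acc = none → acc = none ∧ ∀ b ∈ bs, pvC d p b = none) := by
  intro bs
  induction bs with
  | nil =>
    intro acc
    exact ⟨fun v h => Or.inl h, fun v h => ⟨v, h, le_refl v⟩, by simp, fun h => ⟨h, by simp⟩⟩
  | cons b bs ih =>
    intro acc
    cases hc : pvC d p b with
    | none =>
      have hstep : pvCandStep d p acc b = acc := pvCandStep_of_none acc hc
      have IH := ih acc
      refine ⟨?_, ?_, ?_, ?_⟩
      · intro v hr
        simp only [List.foldl_cons, hstep] at hr
        rcases IH.1 v hr with h | ⟨b', hb', hcb'⟩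
        · exact Or.inl h
        · exact Or.inr ⟨b', List.mem_cons_of_mem _ hb', hcb'⟩
      · intro v hacc
        simp only [List.foldl_cons, hstep]
        exact IH.2.1 v hacc
      · intro b' hb' v hcb'
        simp only [List.foldl_cons, hstep]
        rcases List.mem_cons.mp hb' with rfl | hb'
        · rw [hc] at hcb'; exact absurd hcb' (by simp)
        · exact IH.2.2.1 b' hb' v hcb'
      · intro hr
        simp only [List.foldl_cons, hstep] at hr
        obtain ⟨h1, h2⟩ := IH.2.2.2 hr
        refine ⟨h1, ?_⟩
        intro b' hb'
        rcases List.mem_cons.mp hb' with rfl | hb'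
        · exact hc
        · exact h2 b' hb'
    | some v0 =>
      cases acc with
      | none =>
        have hstep : pvCandStep d p none b = some v0 := pvCandStep_of_some_none hc
        have IH := ih (some v0)
        refine ⟨?_, ?_, ?_, ?_⟩
        · intro v hr
          simp only [List.foldl_cons, hstep] at hr
          rcases IH.1 v hr with h | ⟨b', hb', hcb'⟩
          · obtain rfl : v0 = v := Option.some.inj h
            exact Or.inr ⟨b, by simp, hc⟩
          · exact Or.inr ⟨b', List.mem_cons_of_mem _ hb', hcb'⟩
        · intro v hacc; exact absurd hacc (by simp)
        · intro b' hb' v hcb'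
          simp only [List.foldl_cons, hstep]
          rcases List.mem_cons.mp hb' with rfl | hb'
          · obtain rfl : v0 = v := by rw [hc] at hcb'; exact Option.some.inj hcb'
            exact IH.2.1 v0 rfl
          · exact IH.2.2.1 b' hb' v hcb'
        · intro hr
          simp only [List.foldl_cons, hstep] at hr
          obtain ⟨h1, _⟩ := IH.2.2.2 hr
          exact absurd h1 (by simp)
      | some x =>
        have hstep : pvCandStep d p (some x) b = some (min v0 x) := pvCandStep_of_some_some x hc
        have IH := ih (some (min v0 x))
        refine ⟨?_, ?_, ?_, ?_⟩
        · intro v hr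
          simp only [List.foldl_cons, hstep] at hr
          rcases IH.1 v hr with h | ⟨b', hb', hcb'⟩
          · obtain rfl : min v0 x = v := Option.some.inj h
            rcases min_cases v0 x with ⟨h1, _⟩ | ⟨h1, _⟩
            · exact Or.inr ⟨b, by simp, by rw [hc, h1]⟩
            · exact Or.inl (by rw [h1])
          · exact Or.inr ⟨b', List.mem_cons_of_mem _ hb', hcb'⟩
        · intro v hacc
          obtain rfl : x = v := Option.some.inj hacc
          simp only [List.foldl_cons, hstep]
          obtain ⟨w, hw, hwle⟩ := IH.2.1 (min v0 x) rfl
          exact ⟨w, hw, le_trans hwle (min_le_right _ _)⟩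
        · intro b' hb' v hcb'
          simp only [List.foldl_cons, hstep]
          rcases List.mem_cons.mp hb' with rfl | hb'
          · obtain rfl : v0 = v := by rw [hc] at hcb'; exact Option.some.inj hcb'
            obtain ⟨w, hw, hwle⟩ := IH.2.1 (min v0 x) rfl
            exact ⟨w, hw, le_trans hwle (min_le_left _ _)⟩
          · exact IH.2.2.1 b' hb' v hcb'
        · intro hr
          simp only [List.foldl_cons, hstep] at hr
          obtain ⟨h1, _⟩ := IH.2.2.2 hr
          exact absurd h1 (by simp)

-- A's inner loop when no group matches
lemma pvStepA_no : ∀ (groups : List (List Int)) (p : Int),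
    (∀ i : Nat, i < groups.length → ¬ (pvAnc groups i - p).natAbs ≤ 500) →
    pvStepA groups p = groups ++ [[p]] := by
  intro groups
  induction groups with
  | nil => intro p _; rfl
  | cons g rest ih =>
    intro p h
    have h0 := h 0 (by simp)
    simp only [pvAnc, List.getD_cons_zero] at h0
    simp only [pvStepA, if_neg h0, List.cons_append]
    congr 1
    exact ih p (fun i hi => by
      have := h (i + 1) (by simpa using Nat.succ_lt_succ hi)
      simpa [pvAnc] using this)

-- A's inner loop when i is the first matching group
lemma pvStepA_yes : ∀ (groups : List (List Int)) (p : Int) (i : Nat),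
    i < groups.length → (pvAnc groups i - p).natAbs ≤ 500 →
    (∀ j : Nat, j < i → ¬ (pvAnc groups j - p).natAbs ≤ 500) →
    pvStepA groups p = pvAppendAt groups i p := by
  intro groups
  induction groups with
  | nil => intro p i hi; simp at hi
  | cons g rest ih =>
    intro p i hi hm hmin
    cases i with
    | zero =>
      simp only [pvAnc, List.getD_cons_zero] at hm
      simp only [pvStepA, if_pos hm, pvAppendAt]
    | succ n =>
      have h0 := hmin 0 (Nat.succ_pos n)
      simp only [pvAnc, List.getD_cons_zero] at h0
      simp only [pvStepA, if_neg h0, pvAppendAt]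
      congr 1
      exact ih p n (by simpa using hi) (by simpa [pvAnc] using hm)
        (fun j hj => by
          have := hmin (j + 1) (Nat.succ_lt_succ hj)
          simpa [pvAnc] using this)

lemma pvAppendAt_length : ∀ (groups : List (List Int)) (i : Nat) (p : Int),
    (pvAppendAt groups i p).length = groups.length := by
  intro groups
  induction groups with
  | nil => intro i p; cases i <;> rfl
  | cons g rest ih =>
    intro i p
    cases i with
    | zero => simp [pvAppendAt]
    | succ n => simp [pvAppendAt, ih]

lemma pvAppendAt_getD : ∀ (groups : List (List Int)) (i : Nat) (p : Int) (j : Nat),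
    (pvAppendAt groups i p).getD j [] =
      if j = i ∧ i < groups.length then groups.getD i [] ++ [p] else groups.getD j [] := by
  intro groups
  induction groups with
  | nil => intro i p j; cases i <;> simp [pvAppendAt]
  | cons g rest ih =>
    intro i p j
    cases i with
    | zero =>
      cases j with
      | zero => simp [pvAppendAt]
      | succ m => simp [pvAppendAt]
    | succ n =>
      cases j with
      | zero => simp [pvAppendAt]
      | succ m =>
        simp only [pvAppendAt, List.getD_cons_succ, List.length_cons]
        rw [ih n p m]
        by_cases h : m = n ∧ n < rest.length
        · rw [if_pos h, if_pos ⟨by omega, by omega⟩]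
        · rw [if_neg h, if_neg (by omega)]

-- one step: B's step computes A's step and preserves the invariant
lemma pvStepMain (groups : List (List Int)) (d : PySem.Dict Int (Int × Int)) (p : Int)
    (hInv : pvInv groups d) :
    (pvStepB (groups, d) p).1 = pvStepA groups p ∧
    pvInv (pvStepA groups p) (pvStepB (groups, d) p).2 := by
  obtain ⟨hne, hfar, hmemb, hdomd⟩ := hInv
  have hq : PySem.Int.floordiv p 500 = p / 500 := PySem.Int.floordiv_eq_ediv_of_pos (by norm_num)
  have hCsome : ∀ b v : Int, pvC d p b = some v →
      ∃ i : Nat, v = (i : Int) ∧ i < groups.length ∧ (pvAnc groups i - p).natAbs ≤ 500 := by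
    intro b v hcv
    unfold pvC at hcv
    cases hg : d.get? b with
    | none => simp [hg] at hcv
    | some e =>
      simp only [hg] at hcv
      obtain ⟨i, hi, rfl, -⟩ := hdomd b e hg
      split_ifs at hcv with hcond
      exact ⟨i, (Option.some.inj hcv).symm, hi, hcond⟩
  have hCanchor : ∀ i : Nat, i < groups.length → (pvAnc groups i - p).natAbs ≤ 500 →
      pvC d p (pvAnc groups i / 500) = some (i : Int) ∧
      (pvAnc groups i / 500 = p / 500 - 1 ∨ pvAnc groups i / 500 = p / 500 ∨
       pvAnc groups i / 500 = p / 500 + 1) := by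
    intro i hi hm
    refine ⟨?_, by omega⟩
    unfold pvC
    rw [hmemb i hi]
    simp [hm]
  have hspec := pvFoldlCand d p [p / 500 - 1, p / 500, p / 500 + 1] none
  cases hr : [p / 500 - 1, p / 500, p / 500 + 1].foldl (pvCandStep d p) none with
  | none =>
    obtain ⟨_, hallnone⟩ := hspec.2.2.2 hr
    have hnomatch : ∀ i : Nat, i < groups.length → ¬ (pvAnc groups i - p).natAbs ≤ 500 := by
      intro i hi hm
      obtain ⟨hcv, hb⟩ := hCanchor i hi hm
      have : pvC d p (pvAnc groups i / 500) = none :=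
        hallnone _ (by rcases hb with h | h | h <;> simp [h])
      rw [this] at hcv; exact absurd hcv (by simp)
    have hA : pvStepA groups p = groups ++ [[p]] := pvStepA_no groups p hnomatch
    have hBeq : pvStepB (groups, d) p =
        (groups ++ [[p]], d.insert (p / 500) ((groups.length : Int), p)) := by
      simp only [pvStepB, pvBestOf, hq, hr]
    have hancold : ∀ i : Nat, i < groups.length → pvAnc (groups ++ [[p]]) i = pvAnc groups i := by
      intro i hi
      unfold pvAnc
      rw [List.getD_append _ _ _ _ hi]
    have hancnew : pvAnc (groups ++ [[p]]) groups.length = p := by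
      simp [pvAnc]
    have hfresh : ∀ i : Nat, i < groups.length → pvAnc groups i / 500 ≠ p / 500 := by
      intro i hi heq
      exact hnomatch i hi (by omega)
    rw [hBeq, hA]
    refine ⟨rfl, ?_, ?_, ?_, ?_⟩
    · intro i hi
      simp only [List.length_append, List.length_cons, List.length_nil] at hi
      rcases Nat.lt_succ_iff_lt_or_eq.mp (by simpa using hi) with hi' | rfl
      · rw [List.getD_append _ _ _ _ hi']; exact hne i hi'
      · simp
    · intro i j hij hj
      simp only [List.length_append, List.length_cons, List.length_nil] at hj
      rcases Nat.lt_succ_iff_lt_or_eq.mp (by simpa using hj) with hj' | rfl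
      · rw [hancold i (lt_trans hij hj'), hancold j hj']
        exact hfar i j hij hj'
      · rw [hancold i hij, hancnew]
        have := hnomatch i hij
        omega
    · intro i hi
      simp only [List.length_append, List.length_cons, List.length_nil] at hi
      rcases Nat.lt_succ_iff_lt_or_eq.mp (by simpa using hi) with hi' | rfl
      · rw [hancold i hi', PySem.Dict.get?_insert_of_ne d _ (hfresh i hi'), hmemb i hi']
      · rw [hancnew, PySem.Dict.get?_insert_self]
    · intro b e hbe
      by_cases hbq : b = p / 500
      · subst hbq
        rw [PySem.Dict.get?_insert_self] at hbe
        refine ⟨groups.length, by simp, ?_, by rw [hancnew]⟩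
        rw [hancnew]; injection hbe with h; exact h.symm
      · rw [PySem.Dict.get?_insert_of_ne d _ hbq] at hbe
        obtain ⟨i, hi, he, hb⟩ := hdomd b e hbe
        exact ⟨i, by simp only [List.length_append, List.length_cons, List.length_nil]; omega, by rw [hancold i hi]; exact he, by rw [hancold i hi]; exact hb⟩
  | some v =>
    rcases hspec.1 v hr with habs | ⟨b, _, hcb⟩
    · exact absurd habs (by simp)
    obtain ⟨i, rfl, hi, hm⟩ := hCsome b v hcb
    have hex : ∃ k : Nat, k < groups.length ∧ (pvAnc groups k - p).natAbs ≤ 500 := ⟨i, hi, hm⟩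
    have hfind := Nat.find_spec hex
    have hle : (Nat.find hex : Int) ≤ (i : Int) := by
      exact_mod_cast Nat.find_min' hex ⟨hi, hm⟩
    have hge : (i : Int) ≤ (Nat.find hex : Int) := by
      obtain ⟨hcv, hb⟩ := hCanchor (Nat.find hex) hfind.1 hfind.2
      obtain ⟨w, hw, hwle⟩ := hspec.2.2.1 _ (by rcases hb with h | h | h <;> simp [h]) _ hcv
      rw [hr] at hw
      obtain rfl : (i : Int) = w := Option.some.inj hw
      exact hwle
    have hieq : i = Nat.find hex := by omega
    have hA : pvStepA groups p = pvAppendAt groups i p := by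
      refine pvStepA_yes groups p i hi hm ?_
      intro j hj hmj
      rw [hieq] at hj
      exact Nat.find_min hex hj ⟨lt_trans hj (hieq ▸ hi), hmj⟩
    have hBeq : pvStepB (groups, d) p = (pvAppendAt groups i p, d) := by
      simp only [pvStepB, pvBestOf, hq, hr]
      simp
    have hlen : (pvAppendAt groups i p).length = groups.length := pvAppendAt_length groups i p
    have hgetD : ∀ j : Nat, (pvAppendAt groups i p).getD j [] =
        if j = i ∧ i < groups.length then groups.getD i [] ++ [p] else groups.getD j [] :=
      fun j => pvAppendAt_getD groups i p j
    have hanc : ∀ k : Nat, pvAnc (pvAppendAt groups i p) k = pvAnc groups k := by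
      intro k
      unfold pvAnc
      rw [hgetD k]
      split_ifs with hk
      · obtain ⟨rfl, hlt⟩ := hk
        cases hg : groups.getD k [] with
        | nil => exact absurd hg (hne k hlt)
        | cons a t => rfl
      · rfl
    rw [hBeq, hA]
    refine ⟨rfl, ?_, ?_, ?_, ?_⟩
    · intro j hj
      rw [hlen] at hj
      rw [hgetD j]
      split_ifs with hk
      · simp
      · exact hne j hj
    · intro j k hjk hk
      rw [hlen] at hk
      rw [hanc j, hanc k]
      exact hfar j k hjk hk
    · intro j hj
      rw [hlen] at hj
      rw [hanc j]
      exact hmemb j hj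
    · intro b e hbe
      obtain ⟨j, hj, he, hb⟩ := hdomd b e hbe
      exact ⟨j, hlen ▸ hj, by rw [hanc j]; exact he, by rw [hanc j]; exact hb⟩

lemma pvInvEmpty : pvInv [] PySem.Dict.empty := by
  refine ⟨?_, ?_, ?_, ?_⟩
  · intro i hi; simp at hi
  · intro i j _ hj; simp at hj
  · intro i hi; simp at hi
  · intro b e hbe; simp at hbe

lemma pvFoldMain : ∀ (ps : List Int) (groups : List (List Int)) (d : PySem.Dict Int (Int × Int)),
    pvInv groups d → (ps.foldl pvStepB (groups, d)).1 = ps.foldl pvStepA groups := by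
  intro ps
  induction ps with
  | nil => intro groups d _; rfl
  | cons p ps ih =>
    intro groups d hInv
    obtain ⟨h1, h2⟩ := pvStepMain groups d p hInv
    simp only [List.foldl_cons]
    have : pvStepB (groups, d) p = (pvStepA groups p, (pvStepB (groups, d) p).2) := by
      rw [← h1]
    rw [this]
    exact ih (pvStepA groups p) (pvStepB (groups, d) p).2 h2

-- ===== VERDICT (by name: the statement is the Claim_ definition above) =====
theorem group_close_ones_spec : Claim_equal_group_close_ones := by
  intro positions _
  unfold Spec_group_close_ones group_close_ones group_close_ones_alt
  exact (pvFoldMain positions [] PySem.Dict.empty pvInvEmpty).symm
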